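-- pv_equiv track=rewrite | github.com/Kronopt/advent-of-code | 2021/day_3/solution.py | filter_number
-- ===== SOURCE A (Python) =====
-- import copy
--
-- def filter_number(numbers: list[str], comparison_function: str) -> str:
--     """
--     recursively filters using the exercise logic.
--     comparison_function should either be '__eq__' or '__ne__', for == or != comparisons respectively
--     """
--     filtered_numbers = copy.deepcopy(numbers)
--     safe_number = "0"
--     bit = 0
--     while len(filtered_numbers) > 1:
--         safe_number = filtered_numbers[0]
--
--         if bit > len(filtered_numbers[0]) - 1:
--             break
--
--         most_common = most_common_bit_for_position(filtered_numbers, bit)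
--         filtered_numbers = list(
--             filter(
--                 lambda x: getattr(int(x[bit]), comparison_function)(most_common),
--                 filtered_numbers,
--             )
--         )
--         bit += 1
--
--     if len(filtered_numbers) == 0:
--         filtered_numbers.append(safe_number)
--
--     return filtered_numbers[0]
--
-- def most_common_bit_for_position(numbers: list[str], position: int) -> int:
--     """calculates the most common bit for a given position (if equal, returns 1)"""
--     sum_for_position = 0
--     for number in numbers:
--         sum_for_position += int(number[position])
--
--     return int(sum_for_position >= len(numbers) / 2)
-- ===== SOURCE B (Python) =====
-- def _most_common_bit(numbers, position):
--     ones = sum(int(n[position]) for n in numbers)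
--     return 1 if 2 * ones >= len(numbers) else 0
--
--
-- def _filter_rec(filtered, bit, safe_number, comparison_function):
--     if not filtered:
--         return safe_number
--     first = filtered[0]
--     if len(filtered) == 1 or bit >= len(first):
--         return first
--     most_common = _most_common_bit(filtered, bit)
--     keep = [x for x in filtered
--             if (int(x[bit]) == most_common) != (comparison_function == "__ne__")]
--     return _filter_rec(keep, bit + 1, first, comparison_function)
--
--
-- def filter_number(numbers, comparison_function):
--     return _filter_rec(list(numbers), 0, "0", comparison_function)
-- ===== Notes on version B (the rewrite author's own statement) =====
-- stated objective: simpler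
-- what changed: The while-loop over mutable (filtered, safe_number, bit) state with a break and a post-loop empty-list patch-up is replaced by a direct structural recursion whose base cases return the answer, with most-common-bit computed as a comprehension sum instead of an accumulator loop and the getattr dispatch replaced by an explicit eq/ne comparison.
-- outside the precondition, e.g. on filter_number(['1', '0'], '__lt__'): A returns '0', B returns '1'
import Mathlib
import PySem

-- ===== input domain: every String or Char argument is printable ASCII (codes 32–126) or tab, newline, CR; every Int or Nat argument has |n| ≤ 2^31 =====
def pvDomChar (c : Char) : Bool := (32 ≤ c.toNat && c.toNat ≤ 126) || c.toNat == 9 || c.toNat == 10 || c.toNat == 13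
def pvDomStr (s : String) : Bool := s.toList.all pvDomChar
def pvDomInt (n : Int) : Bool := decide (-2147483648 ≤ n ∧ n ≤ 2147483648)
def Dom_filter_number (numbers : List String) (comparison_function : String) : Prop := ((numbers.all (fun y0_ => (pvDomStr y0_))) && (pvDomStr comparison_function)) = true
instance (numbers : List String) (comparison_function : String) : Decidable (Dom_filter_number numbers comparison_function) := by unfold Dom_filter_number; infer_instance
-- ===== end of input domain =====

-- B replaces A's while-loop with mutable state by a direct structural recursion (the
-- decomposition the docstring describes); same values, no speed claim.

-- ===== PORT A =====
-- int(c) for one digit character; exact on '0'..'9' (the only chars Pre_ admits at indexed positions)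
def pvDigit (c : Char) : Int := (c.toNat : Int) - 48

def most_common_bit_for_position (numbers : List String) (position : Int) : Int :=
  let sum_for_position :=
    numbers.foldl (fun acc number => acc + pvDigit ((PySem.Str.pyGet? number position).getD '0')) 0
  -- Python 'sum >= len/2' ported as '2*sum ≥ len' (exact: both compare integer halves)
  if 2 * sum_for_position ≥ (numbers.length : Int) then 1 else 0

-- getattr(int(x[bit]), comparison_function)(mc); other method names are excluded by Pre_
def pvCmpA (v : Int) (comparison_function : String) (mc : Int) : Bool :=
  if comparison_function = "__eq__" then v == mc
  else if comparison_function = "__ne__" then v != mc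
  else false

-- the while-loop; fuel only makes it total (never exhausted on admitted inputs)
def pvLoopA (cf : String) : Nat → List String → String → Int → (List String × String)
  | 0, filtered, safe, _ => (filtered, safe)
  | fuel + 1, filtered, safe, bit =>
    if filtered.length > 1 then
      let safe' := filtered.headD ""
      if bit > (safe'.length : Int) - 1 then (filtered, safe')
      else
        let mc := most_common_bit_for_position filtered bit
        pvLoopA cf fuel
          (filtered.filter (fun x => pvCmpA (pvDigit ((PySem.Str.pyGet? x bit).getD '0')) cf mc))
          safe' (bit + 1)
    else (filtered, safe)

def filter_number (numbers : List String) (comparison_function : String) : String :=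
  let fuel := numbers.foldl (fun m s => max m s.length) 0 + 2
  let r := pvLoopA comparison_function fuel numbers "0" 0
  (if r.1.length = 0 then r.1 ++ [r.2] else r.1).headD ""

-- ===== PORT B =====
def pv_most_common_bit (numbers : List String) (position : Int) : Int :=
  let ones := (numbers.map (fun n => pvDigit ((PySem.Str.pyGet? n position).getD '0'))).sum
  if 2 * ones ≥ (numbers.length : Int) then 1 else 0

-- _filter_rec; fuel only makes it total (never exhausted on admitted inputs)
def pvFilterRecB (cf : String) : Nat → List String → Int → String → String
  | 0, filtered, _, safe => filtered.headD safe
  | fuel + 1, filtered, bit, safe =>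
    match filtered with
    | [] => safe
    | first :: rest =>
      if rest.length = 0 ∨ (first.length : Int) ≤ bit then first
      else
        let mc := pv_most_common_bit (first :: rest) bit
        pvFilterRecB cf fuel
          ((first :: rest).filter
            (fun x => (pvDigit ((PySem.Str.pyGet? x bit).getD '0') == mc) != (cf == "__ne__")))
          (bit + 1) first

def filter_number_alt (numbers : List String) (comparison_function : String) : String :=
  pvFilterRecB comparison_function (numbers.foldl (fun m s => max m s.length) 0 + 2) numbers 0 "0"

-- ===== PRECONDITION & SPEC =====
-- Pre_ excludes inputs on which A raises (a non-digit character or a too-short string reached by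
-- indexing, or a comparison_function that is no int method), and the accidental-return corners
-- outside them: a comparison_function other than '__eq__'/'__ne__' or unequal-length digit strings,
-- where whether A returns (and what) is an artefact of which string the filter meets first.
def Pre_filter_number (numbers : List String) (comparison_function : String) : Prop :=
  numbers.length ≤ 1 ∨ numbers.headD "0" = "" ∨
  ((comparison_function = "__eq__" ∨ comparison_function = "__ne__") ∧
   ∀ s ∈ numbers, s.length = (numbers.headD "").length ∧ s.toList.all Char.isDigit = true)
instance (numbers : List String) (comparison_function : String) : Decidable (Pre_filter_number numbers comparison_function) := by unfold Pre_filter_number; infer_instance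

def pvWitness_filter_number : List String × String := (["10", "01", "11"], "__eq__")

def Spec_filter_number (numbers : List String) (comparison_function : String) (out : String) : Prop := out = filter_number_alt numbers comparison_function
instance (numbers : List String) (comparison_function : String) (out : String) : Decidable (Spec_filter_number numbers comparison_function out) := by unfold Spec_filter_number; infer_instance

-- ===== CLAIM (what is proved, stated in full; the proofs are below) =====
def Claim_equal_filter_number : Prop := ∀ (numbers : List String) (comparison_function : String), Dom_filter_number numbers comparison_function → Pre_filter_number numbers comparison_function → Spec_filter_number numbers comparison_function (filter_number numbers comparison_function)

-- ===== LEMMAS AND PROOFS =====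
lemma pv_mc_eq (numbers : List String) (position : Int) :
    most_common_bit_for_position numbers position = pv_most_common_bit numbers position := by
  simp [most_common_bit_for_position, pv_most_common_bit, PySem.List.foldl_add]

lemma pv_cmp_eq (v mc : Int) (cf : String) (h : cf = "__eq__" ∨ cf = "__ne__") :
    pvCmpA v cf mc = ((v == mc) != (cf == "__ne__")) := by
  rcases h with h | h <;> subst h <;> cases hv : (v == mc) <;> simp [pvCmpA, hv] <;> simp_all

lemma pv_loop_eq (cf : String) (h : cf = "__eq__" ∨ cf = "__ne__") :
    ∀ (fuel : Nat) (filtered : List String) (safe : String) (bit : Int),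
    (let r := pvLoopA cf fuel filtered safe bit
     (if r.1.length = 0 then r.1 ++ [r.2] else r.1).headD "")
      = pvFilterRecB cf fuel filtered bit safe := by
  intro fuel
  induction fuel with
  | zero =>
    intro filtered safe bit
    cases filtered <;> simp [pvLoopA, pvFilterRecB]
  | succ n ih =>
    intro filtered safe bit
    cases filtered with
    | nil => simp [pvLoopA, pvFilterRecB]
    | cons first rest =>
      by_cases hlen : rest.length = 0
      · rcases List.length_eq_zero_iff.mp hlen with rfl
        simp [pvLoopA, pvFilterRecB]
      · have h2 : (first :: rest).length > 1 := by simp; omega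
        by_cases hbit : (first.length : Int) ≤ bit
        · have hb2 : bit > (first.length : Int) - 1 := by omega
          simp only [pvLoopA, List.headD_cons]
          rw [if_pos h2, if_pos hb2]
          simp [pvFilterRecB, hbit]
        · have hb2 : ¬ bit > (first.length : Int) - 1 := by omega
          have hnot : ¬ (rest.length = 0 ∨ (first.length : Int) ≤ bit) :=
            not_or.mpr ⟨hlen, hbit⟩
          simp only [pvLoopA, pvFilterRecB, List.headD_cons, pv_mc_eq]
          rw [if_pos h2, if_neg hb2, if_neg hnot]
          have hpred : (fun x : String =>
              pvCmpA (pvDigit ((PySem.Str.pyGet? x bit).getD '0')) cf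
                (pv_most_common_bit (first :: rest) bit))
            = (fun x : String =>
              (pvDigit ((PySem.Str.pyGet? x bit).getD '0') ==
                  pv_most_common_bit (first :: rest) bit) != (cf == "__ne__")) := by
            funext x; rw [pv_cmp_eq _ _ _ h]
          rw [hpred]
          exact ih _ _ _

-- ===== VERDICT (by name: the statement is the Claim_ definition above) =====
theorem filter_number_spec : Claim_equal_filter_number := by
  intro numbers cf _hdom hpre
  unfold Spec_filter_number filter_number filter_number_alt
  rcases hpre with hlen | hhead | ⟨hcf, _⟩
  · -- 0 or 1 numbers: the loop/recursion stops immediately on either side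
    match numbers, hlen with
    | [], _ => simp [pvLoopA, pvFilterRecB]
    | [x], _ => simp [pvLoopA, pvFilterRecB]
  · -- first string empty: both sides return it at once
    match numbers, hhead with
    | [], h => simp [pvLoopA, pvFilterRecB]
    | x :: rest, h =>
      simp only [List.headD_cons] at h; subst h
      cases rest with
      | nil => simp [pvLoopA, pvFilterRecB]
      | cons y ys => simp [pvLoopA, pvFilterRecB]
  · exact pv_loop_eq cf hcf _ numbers "0" 0
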